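-- pv_equiv track=rewrite | github.com/RMAbadia/Python | ED/Ordenacao_e_Busca/questao01.py | verifica
-- ===== SOURCE A (Python) =====
-- def verifica(string1, string2):
--     resposta1 = sorted(list(string1))
--     resposta2 = sorted(list(string2))
--     imprevisto = ''
--     estudar = ''
--
--     for i in resposta1:
--         if i in resposta2:
--             resposta2.remove(i)
--         else:
--             if i not in estudar:
--                 estudar += i
--
--     for i in resposta2:
--         imprevisto += i
--
--     return estudar, imprevisto
-- ===== SOURCE B (Python) =====
-- def verifica(string1, string2):
--     # Count each string once, then read the two answers off the count tables:
--     # estudar = sorted distinct chars occurring more often in string1 than in string2,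
--     # imprevisto = sorted leftover chars of string2 with full multiplicity.
--     c1 = {}
--     for ch in string1:
--         c1[ch] = c1.get(ch, 0) + 1
--     c2 = {}
--     for ch in string2:
--         c2[ch] = c2.get(ch, 0) + 1
--     estudar = ''.join(sorted(ch for ch in c1 if c1[ch] > c2.get(ch, 0)))
--     imprevisto = ''.join(ch * (c2[ch] - c1.get(ch, 0))
--                          for ch in sorted(c2) if c2[ch] > c1.get(ch, 0))
--     return estudar, imprevisto
-- ===== Notes on version B (the rewrite author's own statement) =====
-- stated objective: faster
-- what changed: B replaces A's sort-both-strings-then-scan-and-remove matching loop (a linear membership test and a linear remove per character of string1) by building two count tables in one pass each and reading both answers off the tables: estudar = sorted distinct chars with count1 > count2, imprevisto = sorted leftover chars of string2 with multiplicity count2 - count1.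
import Mathlib
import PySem

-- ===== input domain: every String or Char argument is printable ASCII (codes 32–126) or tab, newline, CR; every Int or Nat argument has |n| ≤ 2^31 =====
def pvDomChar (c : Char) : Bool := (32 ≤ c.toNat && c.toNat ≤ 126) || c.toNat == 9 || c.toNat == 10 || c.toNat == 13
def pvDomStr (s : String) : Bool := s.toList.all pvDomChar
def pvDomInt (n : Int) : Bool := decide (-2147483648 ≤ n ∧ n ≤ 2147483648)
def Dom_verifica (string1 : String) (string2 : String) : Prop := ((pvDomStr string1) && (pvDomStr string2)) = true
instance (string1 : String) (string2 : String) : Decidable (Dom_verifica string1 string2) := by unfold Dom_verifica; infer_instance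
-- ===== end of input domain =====

-- B replaces A's sort-copy-and-remove matching loop (quadratic scanning) by two count tables
-- read off once (objective: faster).

-- ===== PORT A =====
-- strings built up char by char are modelled as List Char (PySem's string representation)
-- and wrapped with String.mk at the return, exact for every string.
def verifica (string1 : String) (string2 : String) : String × String :=
  let resposta1 := PySem.List.sorted string1.toList (fun c => c) false
  let resposta2 := PySem.List.sorted string2.toList (fun c => c) false
  -- state: (resposta2, estudar); 'resposta2.remove(i)' is guarded by 'i in resposta2',
  -- so remove? is always 'some' and the 'none' arm is unreachable
  let st := resposta1.foldl
    (fun (s : List Char × List Char) i =>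
      if i ∈ s.1 then
        match PySem.List.remove? s.1 i with
        | some r => (r, s.2)
        | none => (s.1, s.2)
      else (s.1, if i ∈ s.2 then s.2 else s.2 ++ [i]))
    (resposta2, [])
  let imprevisto := st.1.foldl (fun (acc : List Char) i => acc ++ [i]) []
  (String.mk st.2, String.mk imprevisto)

-- ===== PORT B =====
def verifica_alt (string1 : String) (string2 : String) : String × String :=
  let c1 := string1.toList.foldl
    (fun (d : PySem.Dict Char Int) ch => d.insert ch (d.getD ch 0 + 1)) PySem.Dict.empty
  let c2 := string2.toList.foldl
    (fun (d : PySem.Dict Char Int) ch => d.insert ch (d.getD ch 0 + 1)) PySem.Dict.empty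
  let estudar := PySem.List.sorted
    (c1.keys.filter (fun ch => decide (c1.getD ch 0 > c2.getD ch 0))) (fun c => c) false
  let imprevisto := (PySem.List.sorted c2.keys (fun c => c) false).foldl
    (fun (acc : List Char) ch =>
      if c2.getD ch 0 > c1.getD ch 0 then
        acc ++ List.replicate (c2.getD ch 0 - c1.getD ch 0).toNat ch
      else acc)
    []
  (String.mk estudar, String.mk imprevisto)

-- ===== PRECONDITION & SPEC =====
def Spec_verifica (string1 : String) (string2 : String) (out : String × String) : Prop := out = verifica_alt string1 string2
instance (string1 : String) (string2 : String) (out : String × String) : Decidable (Spec_verifica string1 string2 out) := by unfold Spec_verifica; infer_instance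

-- ===== CLAIM (what is proved, stated in full; the proofs are below) =====
def Claim_equal_verifica : Prop := ∀ (string1 : String) (string2 : String), Dom_verifica string1 string2 → Spec_verifica string1 string2 (verifica string1 string2)

-- ===== LEMMAS AND PROOFS =====

-- A's loop body, named for the proofs (definitionally equal to the lambda in the port)
def pvStep (s : List Char × List Char) (i : Char) : List Char × List Char :=
  if i ∈ s.1 then
    match PySem.List.remove? s.1 i with
    | some r => (r, s.2)
    | none => (s.1, s.2)
  else (s.1, if i ∈ s.2 then s.2 else s.2 ++ [i])

lemma pvStep_mem (s : List Char × List Char) (i : Char) (h : i ∈ s.1) :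
    pvStep s i = (s.1.erase i, s.2) := by
  simp [pvStep, h, PySem.List.remove?_eq_some_erase s.1 i h]

lemma pvStep_not_mem (s : List Char × List Char) (i : Char) (h : i ∉ s.1) :
    pvStep s i = (s.1, if i ∈ s.2 then s.2 else s.2 ++ [i]) := by
  simp [pvStep, h]

lemma pv_fst (l1 : List Char) : ∀ r2 est,
    (List.foldl pvStep (r2, est) l1).1 = l1.foldl (fun (r : List Char) i => r.erase i) r2 := by
  induction l1 with
  | nil => intro r2 est; rfl
  | cons i t ih =>
    intro r2 est
    by_cases h : i ∈ r2
    · simp only [List.foldl_cons, pvStep_mem (r2, est) i h, ih]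
    · simp only [List.foldl_cons, pvStep_not_mem (r2, est) i h, ih,
        List.erase_of_not_mem h]

lemma pv_mem (l1 : List Char) : ∀ r2 est c,
    (c ∈ (List.foldl pvStep (r2, est) l1).2 ↔ c ∈ est ∨ r2.count c < l1.count c) := by
  induction l1 with
  | nil => intro r2 est c; simp
  | cons i t ih =>
    intro r2 est c
    by_cases h : i ∈ r2
    · rw [List.foldl_cons, pvStep_mem (r2, est) i h, ih]
      have hpos : 0 < r2.count i := List.count_pos_iff.mpr h
      by_cases hce : c ∈ est
      · simp [hce]
      · simp only [hce, false_or]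
        rcases eq_or_ne c i with rfl | hne
        · rw [List.count_erase_self, List.count_cons, if_pos (by simp)]
          omega
        · rw [List.count_erase_of_ne hne, List.count_cons,
            if_neg (by simp [Ne.symm hne])]
          omega
    · have hz : r2.count i = 0 := List.count_eq_zero.mpr h
      rw [List.foldl_cons, pvStep_not_mem (r2, est) i h]
      by_cases he : i ∈ est
      · rw [if_pos he, ih]
        rcases eq_or_ne c i with rfl | hne
        · simp [he]
        · rw [List.count_cons, if_neg (by simp [Ne.symm hne])]
          simp
      · rw [if_neg he, ih]
        rcases eq_or_ne c i with rfl | hne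
        · simp [hz]
        · simp only [List.mem_append, List.mem_singleton, hne, or_false,
            List.count_cons, if_neg (by simp [Ne.symm hne] : ¬ ((i == c) = true))]
          simp

lemma pv_lt (l1 : List Char) : ∀ r2 est, l1.Pairwise (· ≤ ·) → est.Pairwise (· < ·) →
    (∀ c ∈ est, ∀ d ∈ l1, c ≤ d) →
    (List.foldl pvStep (r2, est) l1).2.Pairwise (· < ·) := by
  induction l1 with
  | nil => intro r2 est _ he _; exact he
  | cons i t ih =>
    intro r2 est hl he hinv
    rw [List.pairwise_cons] at hl
    have hinv' : ∀ c ∈ est, ∀ d ∈ t, c ≤ d := fun c hc d hd => hinv c hc d (List.mem_cons_of_mem i hd)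
    by_cases h : i ∈ r2
    · rw [List.foldl_cons, pvStep_mem (r2, est) i h]
      exact ih _ _ hl.2 he hinv'
    · rw [List.foldl_cons, pvStep_not_mem (r2, est) i h]
      by_cases hie : i ∈ est
      · rw [if_pos hie]
        exact ih _ _ hl.2 he hinv'
      · rw [if_neg hie]
        apply ih _ _ hl.2
        · rw [List.pairwise_append]
          refine ⟨he, List.pairwise_singleton _ _, ?_⟩
          intro c hc y hy
          have hyi := List.mem_singleton.mp hy
          exact hyi.symm ▸ lt_of_le_of_ne (hinv c hc i (List.mem_cons_self ..)) (fun hci => hie (hci ▸ hc))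
        · intro c hc d hd
          rcases List.mem_append.mp hc with hc' | hc'
          · exact hinv' c hc' d hd
          · rw [List.mem_singleton] at hc'; subst hc'
            exact hl.1 d hd

lemma pv_count_erase (l1 : List Char) : ∀ l2 c,
    (l1.foldl (fun (r : List Char) i => r.erase i) l2).count c = l2.count c - l1.count c := by
  induction l1 with
  | nil => intro l2 c; simp
  | cons i t ih =>
    intro l2 c
    rw [List.foldl_cons, ih]
    rcases eq_or_ne c i with rfl | hne
    · rw [List.count_erase_self, List.count_cons, if_pos (by simp)]; omega
    · rw [List.count_erase_of_ne hne, List.count_cons, if_neg (by simp [Ne.symm hne])]; omega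

lemma pv_erase_sublist (l1 : List Char) : ∀ l2,
    (l1.foldl (fun (r : List Char) i => r.erase i) l2).Sublist l2 := by
  induction l1 with
  | nil => intro l2; simp
  | cons i t ih =>
    intro l2
    exact (ih (l2.erase i)).trans (List.erase_sublist ..)

lemma pv_count_flatMap (g : Char → List Char) (hg : ∀ ch c, c ∈ g ch → c = ch) (c : Char) :
    ∀ keys : List Char, keys.Nodup →
    (keys.flatMap g).count c = if c ∈ keys then (g c).count c else 0 := by
  intro keys
  induction keys with
  | nil => simp
  | cons k t ih =>
    intro hnd
    rw [List.nodup_cons] at hnd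
    rw [List.flatMap_cons, List.count_append, ih hnd.2]
    rcases eq_or_ne c k with rfl | hne
    · simp [hnd.1]
    · have : (g k).count c = 0 := List.count_eq_zero.mpr (fun hc => hne (hg k c hc))
      simp [this, hne]

-- strictly sorted from sorted + nodup
lemma pv_pairwise_lt_of_le_nodup (l : List Char) (h : l.Pairwise (· ≤ ·)) (hnd : l.Nodup) :
    l.Pairwise (· < ·) :=
  (h.and hnd).imp (fun h => lt_of_le_of_ne h.1 h.2)

-- the estudar sides agree
lemma pv_estudar_eq (s1 s2 : List Char) :
    (List.foldl pvStep (PySem.List.sorted s2 (fun c => c) false, [])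
        (PySem.List.sorted s1 (fun c => c) false)).2 =
    PySem.List.sorted
      (((PySem.Dict.counter s1 : PySem.Dict Char Int)).keys.filter
        (fun ch => decide ((PySem.Dict.counter s1 : PySem.Dict Char Int).getD ch 0 >
                           (PySem.Dict.counter s2 : PySem.Dict Char Int).getD ch 0)))
      (fun c => c) false := by
  set l1 := PySem.List.sorted s1 (fun c => c) false with hl1
  set l2 := PySem.List.sorted s2 (fun c => c) false with hl2
  have hc1 : ∀ c, l1.count c = s1.count c := fun c => (PySem.List.sorted_perm ..).count_eq c
  have hc2 : ∀ c, l2.count c = s2.count c := fun c => (PySem.List.sorted_perm ..).count_eq c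
  -- A's estudar
  have hmemA : ∀ c, c ∈ (List.foldl pvStep (l2, []) l1).2 ↔ s2.count c < s1.count c := by
    intro c
    rw [pv_mem l1 l2 [] c, hc1, hc2]
    simp
  have hltA : (List.foldl pvStep (l2, []) l1).2.Pairwise (· < ·) := by
    apply pv_lt l1 l2 []
    · have := PySem.List.sorted_pairwise (xs := s1) (key := fun c => c)
      simpa using this
    · exact List.Pairwise.nil
    · intro c hc; exact absurd hc (List.not_mem_nil)
  -- B's filtered key list
  set X := (((PySem.Dict.counter s1 : PySem.Dict Char Int)).keys.filter
      (fun ch => decide ((PySem.Dict.counter s1 : PySem.Dict Char Int).getD ch 0 >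
                         (PySem.Dict.counter s2 : PySem.Dict Char Int).getD ch 0))) with hX
  have hmemX : ∀ c, c ∈ X ↔ s2.count c < s1.count c := by
    intro c
    rw [hX, List.mem_filter]
    simp only [PySem.Dict.getD_counter, PySem.Dict.keys_counter, decide_eq_true_eq]
    constructor
    · intro ⟨_, h⟩; exact_mod_cast h
    · intro h
      refine ⟨?_, by exact_mod_cast h⟩
      have : 0 < s1.count c := by omega
      exact (PySem.Set.mem_ofList ..).mpr (List.count_pos_iff.mp this)
  have hndX : X.Nodup := List.Nodup.filter _ (by
    rw [PySem.Dict.keys_counter]; exact PySem.Set.nodup_ofList s1)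
  have hperm : (List.foldl pvStep (l2, []) l1).2.Perm X := by
    rw [List.perm_ext_iff_of_nodup (hltA.imp ne_of_lt) hndX]
    intro a; rw [hmemA, hmemX]
  exact (PySem.List.sorted_eq_of_perm_of_pairwise_lt _ _ (fun c => c) hperm (by simpa using hltA)).symm

-- the imprevisto sides agree
lemma pv_imprevisto_eq (s1 s2 : List Char) :
    (PySem.List.sorted s1 (fun c => c) false).foldl (fun (r : List Char) i => r.erase i)
        (PySem.List.sorted s2 (fun c => c) false) =
    (PySem.List.sorted ((PySem.Dict.counter s2 : PySem.Dict Char Int)).keys (fun c => c) false).foldl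
      (fun (acc : List Char) ch =>
        if (PySem.Dict.counter s2 : PySem.Dict Char Int).getD ch 0 >
           (PySem.Dict.counter s1 : PySem.Dict Char Int).getD ch 0 then
          acc ++ List.replicate ((PySem.Dict.counter s2 : PySem.Dict Char Int).getD ch 0 -
            (PySem.Dict.counter s1 : PySem.Dict Char Int).getD ch 0).toNat ch
        else acc)
      [] := by
  set l1 := PySem.List.sorted s1 (fun c => c) false with hl1
  set l2 := PySem.List.sorted s2 (fun c => c) false with hl2
  have hc1 : ∀ c, l1.count c = s1.count c := fun c => (PySem.List.sorted_perm ..).count_eq c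
  have hc2 : ∀ c, l2.count c = s2.count c := fun c => (PySem.List.sorted_perm ..).count_eq c
  -- the block function of B's loop
  set g : Char → List Char := fun ch =>
    if (PySem.Dict.counter s2 : PySem.Dict Char Int).getD ch 0 >
       (PySem.Dict.counter s1 : PySem.Dict Char Int).getD ch 0 then
      List.replicate ((PySem.Dict.counter s2 : PySem.Dict Char Int).getD ch 0 -
        (PySem.Dict.counter s1 : PySem.Dict Char Int).getD ch 0).toNat ch
    else [] with hg
  have hgmem : ∀ ch c, c ∈ g ch → c = ch := by
    intro ch c hc
    simp only [hg] at hc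
    split at hc
    · exact List.eq_of_mem_replicate hc
    · cases hc
  have hgcount : ∀ c, (g c).count c = s2.count c - s1.count c := by
    intro c
    simp only [hg, PySem.Dict.getD_counter]
    split
    · rename_i h
      rw [List.count_replicate_self]
      omega
    · rename_i h
      rw [List.count_nil]
      have hle : (s2.count c : Int) ≤ (s1.count c : Int) := not_lt.mp h
      have : s2.count c ≤ s1.count c := by exact_mod_cast hle
      omega
  set K := PySem.List.sorted ((PySem.Dict.counter s2 : PySem.Dict Char Int)).keys (fun c => c) false
    with hK
  have hndK : K.Nodup := by
    have hp : K.Perm ((PySem.Dict.counter s2 : PySem.Dict Char Int)).keys := by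
      rw [hK]; exact PySem.List.sorted_perm ..
    exact hp.nodup_iff.mpr (by rw [PySem.Dict.keys_counter]; exact PySem.Set.nodup_ofList s2)
  have hmemK : ∀ c, c ∈ K ↔ c ∈ s2 := by
    intro c
    rw [hK, PySem.List.mem_sorted, PySem.Dict.keys_counter, PySem.Set.mem_ofList]
  -- B's loop is a flatMap over K
  have hloop : K.foldl (fun (acc : List Char) ch =>
      if (PySem.Dict.counter s2 : PySem.Dict Char Int).getD ch 0 >
         (PySem.Dict.counter s1 : PySem.Dict Char Int).getD ch 0 then
        acc ++ List.replicate ((PySem.Dict.counter s2 : PySem.Dict Char Int).getD ch 0 -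
          (PySem.Dict.counter s1 : PySem.Dict Char Int).getD ch 0).toNat ch
      else acc) [] = K.flatMap g := by
    have : ∀ (acc : List Char) ch,
        (if (PySem.Dict.counter s2 : PySem.Dict Char Int).getD ch 0 >
            (PySem.Dict.counter s1 : PySem.Dict Char Int).getD ch 0 then
          acc ++ List.replicate ((PySem.Dict.counter s2 : PySem.Dict Char Int).getD ch 0 -
            (PySem.Dict.counter s1 : PySem.Dict Char Int).getD ch 0).toNat ch
        else acc) = acc ++ g ch := by
      intro acc ch
      simp only [hg]
      split <;> simp
    calc K.foldl _ [] = K.foldl (fun acc ch => acc ++ g ch) [] := by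
            exact PySem.List.foldl_congr_mem K _ _ [] (fun acc ch _ => this acc ch)
      _ = K.flatMap g := by simpa using PySem.List.foldl_append_eq_flatMap g (l := K) (acc := [])
  rw [hloop]
  -- both sides: same counts, both weakly sorted
  have hcntA : ∀ c, (l1.foldl (fun (r : List Char) i => r.erase i) l2).count c = s2.count c - s1.count c := by
    intro c; rw [pv_count_erase, hc1, hc2]
  have hcntB : ∀ c, (K.flatMap g).count c = s2.count c - s1.count c := by
    intro c
    rw [pv_count_flatMap g hgmem c K hndK]
    by_cases h : c ∈ K
    · rw [if_pos h, hgcount]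
    · rw [if_neg h]
      have : s2.count c = 0 := List.count_eq_zero.mpr (fun hc => h ((hmemK c).mpr hc))
      omega
  have hsortA : (l1.foldl (fun (r : List Char) i => r.erase i) l2).Pairwise (· ≤ ·) := by
    refine List.Pairwise.sublist (pv_erase_sublist l1 l2) ?_
    have := PySem.List.sorted_pairwise (xs := s2) (key := fun c => c)
    simpa using this
  have hsortB : (K.flatMap g).Pairwise (· ≤ ·) := by
    have hKlt : K.Pairwise (· < ·) := by
      apply pv_pairwise_lt_of_le_nodup _ _ hndK
      rw [hK]
      have := PySem.List.sorted_pairwise (xs := ((PySem.Dict.counter s2 : PySem.Dict Char Int)).keys)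
        (key := fun c => c)
      simpa using this
    rw [List.flatMap_def, List.pairwise_flatten]
    refine ⟨?_, ?_⟩
    · intro l hl
      rw [List.mem_map] at hl
      obtain ⟨ch, _, rfl⟩ := hl
      simp only [hg]
      split
      · exact List.pairwise_replicate_of_refl ..
      · exact List.Pairwise.nil
    · refine List.Pairwise.map _ ?_ hKlt
      intro a b hab x hx y hy
      rw [hgmem a x hx, hgmem b y hy]
      exact le_of_lt hab
  refine PySem.List.eq_of_perm_of_pairwise_le ?_ hsortA hsortB
  exact List.perm_iff_count.mpr (fun c => by rw [hcntA, hcntB])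

-- ===== VERDICT (by name: the statement is the Claim_ definition above) =====
theorem verifica_spec : Claim_equal_verifica := by
  intro string1 string2 _
  unfold Spec_verifica verifica verifica_alt
  have hstep : (fun (s : List Char × List Char) i =>
      if i ∈ s.1 then
        match PySem.List.remove? s.1 i with
        | some r => (r, s.2)
        | none => (s.1, s.2)
      else (s.1, if i ∈ s.2 then s.2 else s.2 ++ [i])) = pvStep := rfl
  simp only [hstep, PySem.Dict.foldl_insert_getD_add_one_eq_counter,
    PySem.List.foldl_append_singleton_eq_self, List.nil_append, pv_fst,
    pv_estudar_eq, pv_imprevisto_eq]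
  rfl
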